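-- pv_equiv track=rewrite | github.com/abuhanif27/nobonir | backend/ai_engine/views.py | _normalized_ip
-- ===== SOURCE A (Python) =====
-- def _normalized_ip(value: str) -> str:
-- 	if not value:
-- 		return ""
--
-- 	ip = str(value).strip()
-- 	if not ip:
-- 		return ""
--
-- 	allowed = set("0123456789abcdefABCDEF:.")
-- 	return ip if all(char in allowed for char in ip) else ""
-- ===== SOURCE B (Python) =====
-- import re
--
-- _IP_CHARSET = re.compile(r'[0-9a-fA-F:.]+')
--
-- def _normalized_ip(value: str) -> str:
--     if not value:
--         return ""
--     ip = str(value).strip()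
--     if not ip:
--         return ""
--     return ip if _IP_CHARSET.fullmatch(ip) else ""
-- ===== Notes on version B (the rewrite author's own statement) =====
-- stated objective: idiomatic
-- what changed: Replaces the per-character membership scan against a built set with a single precompiled anchored regex fullmatch of the character class [0-9a-fA-F:.]+.
import Mathlib
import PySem

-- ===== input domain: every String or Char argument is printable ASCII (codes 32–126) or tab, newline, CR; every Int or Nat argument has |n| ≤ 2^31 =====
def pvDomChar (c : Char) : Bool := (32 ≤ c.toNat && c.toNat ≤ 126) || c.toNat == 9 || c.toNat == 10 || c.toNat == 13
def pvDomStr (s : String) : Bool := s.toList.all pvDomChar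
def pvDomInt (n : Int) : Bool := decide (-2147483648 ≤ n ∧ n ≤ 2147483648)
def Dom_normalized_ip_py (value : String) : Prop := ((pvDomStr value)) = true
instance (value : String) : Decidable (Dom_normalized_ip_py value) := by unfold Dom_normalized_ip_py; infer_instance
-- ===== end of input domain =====

-- B replaces A's per-character set-membership scan with an anchored regex-style
-- character-class matcher ([0-9a-fA-F:.]+); objective: idiomatic.

-- ===== PORT A =====
def normalized_ip_py (value : String) : String :=
  if value = "" then ""
  else
    let ip := PySem.Str.strip value
    if ip = "" then ""
    else
      let allowed : PySem.Set Char := PySem.Set.ofList "0123456789abcdefABCDEF:.".toList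
      if ip.toList.all (fun char => PySem.Set.contains allowed char) then ip else ""

-- ===== PORT B =====
-- regex character class [0-9a-fA-F:.] as a range test
def ipClassChar (c : Char) : Bool :=
  ('0' ≤ c && c ≤ '9') || ('a' ≤ c && c ≤ 'f') || ('A' ≤ c && c ≤ 'F') || c == ':' || c == '.'

-- [class]* : zero or more class characters
def ipClassStar : List Char → Bool
  | [] => true
  | c :: rest => ipClassChar c && ipClassStar rest

-- [class]+ : one class character, then [class]* (re.fullmatch of the pattern)
def ipClassPlus : List Char → Bool
  | [] => false
  | c :: rest => ipClassChar c && ipClassStar rest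

def normalized_ip_py_alt (value : String) : String :=
  if value = "" then ""
  else
    let ip := PySem.Str.strip value
    if ip = "" then ""
    else if ipClassPlus ip.toList then ip else ""

-- ===== PRECONDITION & SPEC =====
def Spec_normalized_ip_py (value : String) (out : String) : Prop := out = normalized_ip_py_alt value
instance (value : String) (out : String) : Decidable (Spec_normalized_ip_py value out) := by unfold Spec_normalized_ip_py; infer_instance

-- ===== CLAIM (what is proved, stated in full; the proofs are below) =====
def Claim_equal_normalized_ip_py : Prop := ∀ (value : String), Dom_normalized_ip_py value → Spec_normalized_ip_py value (normalized_ip_py value)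

-- ===== LEMMAS AND PROOFS =====

-- the class test coincides with membership in A's allowed set, for every char
theorem ipClassChar_eq_contains (c : Char) :
    PySem.Set.contains (PySem.Set.ofList "0123456789abcdefABCDEF:.".toList) c = ipClassChar c := by
  have h : PySem.Set.ofList "0123456789abcdefABCDEF:.".toList
      = "0123456789abcdefABCDEF:.".toList := by decide
  rw [h, Bool.eq_iff_iff]
  simp [PySem.Set.contains, ipClassChar, Char.le_def, Char.ext_iff,
    UInt32.le_iff_toNat_le, UInt32.ext_iff]
  omega

theorem ipClassStar_eq_all (cs : List Char) : ipClassStar cs = cs.all ipClassChar := by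
  induction cs with
  | nil => rfl
  | cons c rest ih => simp [ipClassStar, ih]

theorem ipClassPlus_eq_all (cs : List Char) (h : cs ≠ []) : ipClassPlus cs = cs.all ipClassChar := by
  cases cs with
  | nil => exact absurd rfl h
  | cons c rest => simp [ipClassPlus, ipClassStar_eq_all]

-- ===== VERDICT (by name: the statement is the Claim_ definition above) =====
theorem normalized_ip_py_spec : Claim_equal_normalized_ip_py := by
  intro value _
  unfold Spec_normalized_ip_py normalized_ip_py normalized_ip_py_alt
  by_cases hv : value = ""
  · simp [hv]
  · simp only [hv, if_false]
    by_cases hs : PySem.Str.strip value = ""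
    · simp [hs]
    · have hne : (PySem.Str.strip value).toList ≠ [] := by
        intro h
        exact hs (by rw [← String.ofList_toList (s := PySem.Str.strip value), h])
      simp only [hs, if_false]
      rw [ipClassPlus_eq_all _ hne]
      simp only [List.all_eq, ipClassChar_eq_contains]
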